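-- pv_equiv track=rewrite | github.com/klemptobias-oss/birkenbihl-translinear_public | Poesie_Code.py | expand_slash_alternatives
-- ===== SOURCE A (Python) =====
-- def expand_slash_alternatives(tokens: list[str]) -> list[list[str]]:
--     """
--     ═══════════════════════════════════════════════════════════════════════════════════════
--     BEDEUTUNGS-STRAUß: Expandiert Token-Listen mit `/`-Alternativen in mehrere Zeilen
--     ═══════════════════════════════════════════════════════════════════════════════════════
--
--     ZWECK:
--         Implementiert das "BEDEUTUNGS-STRAUß"-Feature nach Vera F. Birkenbihl.
--         Erlaubt mehrere Übersetzungsalternativen für ein Wort, die eng untereinander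
--         als "gekoppelte Doppel-/Dreifachzeile" dargestellt werden (wie DE/EN in 3-sprachigen PDFs).
--
--     WARUM FUNKTIONIERT DAS SO GUT?
--         1. FRÜHE TRANSFORMATION: Diese Funktion wird GANZ AM ANFANG aufgerufen (in process_input_file),
--            VOR allen anderen Verarbeitungsschritten (Tagging, Farben, Meter-Marker, etc.)
--         2. SAUBERE DATENSTRUKTUR: Erzeugt `*_tokens_alternatives` Listen, die durch ALLE
--            nachfolgenden Schritte transparent durchgereicht werden
--         3. POSITION PRESERVATION: Leere Strings an Positionen ohne `/` erhalten die Token-Ausrichtung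
--         4. KEINE DUPLIKATE: Griechische Zeile wird NICHT dupliziert (nur Übersetzungen expandiert)
--
--     BEISPIEL:
--         Input:  ['den|Mann/über|den|Mann', 'mir', 'sage,/verrate,', 'Muse,/Göttin,']
--         Output: [
--             ['den|Mann',         'mir', 'sage,',    'Muse,'],      # Alternative 0
--             ['über|den|Mann',    '',    'verrate,', 'Göttin,']     # Alternative 1
--         ]
--
--         WICHTIG: Leerer String ('') bei 'mir' in Alternative 1, weil 'mir' kein `/` hat!
--                  Dies erhält die Token-Positionen und Spaltenausrichtung im PDF.
--
--     INTEGRATION MIT REST DES SYSTEMS: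
--         - Tags (nomen, verb, etc.) werden VOR dieser Funktion extrahiert → bleiben erhalten
--         - Farben (#, +, -, §) sind bereits in Tokens → werden mitkopiert
--         - Meter-Marker (´ˆˉ) sind bereits in Tokens → werden mitkopiert
--         - HideTrans-Flags werden parallel gespeichert → funktionieren weiterhin
--
--     Args:
--         tokens: Liste von Tokens, möglicherweise mit `/`-Trennzeichen
--
--     Returns:
--         Liste von Token-Listen (eine pro Alternative)
--         Wenn keine `/` vorhanden, wird eine einzige Zeile zurückgegeben
--         Max. 4 Alternativen (bei 3 `/` pro Token)
--     """
--     # Zähle maximale Anzahl von Alternativen über alle Tokens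
--     max_alternatives = 1
--     for token in tokens:
--         if token:
--             # Zähle `/` im Token (jedes `/` fügt eine Alternative hinzu)
--             slash_count = token.count('/')
--             alternatives_in_token = slash_count + 1
--             max_alternatives = max(max_alternatives, alternatives_in_token)
--
--     # Begrenze auf max. 4 Alternativen (3 `/` pro Token)
--     max_alternatives = min(max_alternatives, 4)
--
--     # Erstelle die erweiterten Zeilen
--     result = []
--     for alt_idx in range(max_alternatives):
--         new_line = []
--         for token in tokens:
--             if not token:
--                 new_line.append('')
--                 continue
--
--             # Splitte Token an `/`
--             alternatives = token.split('/')
--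
--             # Wähle die entsprechende Alternative (oder letzte, falls Index zu groß)
--             if alt_idx < len(alternatives):
--                 new_line.append(alternatives[alt_idx])
--             else:
--                 # Kein weiteres `/` in diesem Token - verwende leeren String
--                 new_line.append('')
--
--         result.append(new_line)
--
--     return result
-- ===== SOURCE B (Python) =====
-- def expand_slash_alternatives(tokens: list[str]) -> list[list[str]]:
--     """Column-wise transpose of the per-token alternative lists, capped at 4 rows."""
--     if not tokens:
--         return [[]]
--     cols = [token.split('/') for token in tokens]
--     rows = []
--     while any(cols):
--         rows.append([c[0] if c else '' for c in cols])
--         cols = [c[1:] for c in cols]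
--     return rows[:4]
-- ===== Notes on version B (the rewrite author's own statement) =====
-- stated objective: alternative
-- what changed: Replaces the count-the-slashes pass plus alternative-major double loop that re-splits and indexes every token per row by a single split pass followed by a column-wise transpose (peel the head of every alternative list per row until all are exhausted), capped to 4 rows at the end.
import Mathlib
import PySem

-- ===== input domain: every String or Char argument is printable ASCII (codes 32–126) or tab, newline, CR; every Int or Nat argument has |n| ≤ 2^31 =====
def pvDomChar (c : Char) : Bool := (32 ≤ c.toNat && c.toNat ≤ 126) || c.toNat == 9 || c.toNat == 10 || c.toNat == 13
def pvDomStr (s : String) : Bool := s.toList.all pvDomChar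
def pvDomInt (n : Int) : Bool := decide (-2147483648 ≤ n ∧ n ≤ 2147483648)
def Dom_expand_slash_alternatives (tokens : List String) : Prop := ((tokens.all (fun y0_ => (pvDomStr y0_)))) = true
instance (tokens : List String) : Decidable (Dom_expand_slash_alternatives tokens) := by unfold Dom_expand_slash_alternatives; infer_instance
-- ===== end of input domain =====

-- B replaces A's slash-count pass plus alternative-major double loop by one split pass and a
-- column-wise transpose (peel heads row by row), capped at 4 rows; same return value, 'alternative' objective.

-- ===== PORT A =====
-- token.split('/') (sep nonempty), shared primitive wrapper used by both ports
def pySplitSlash (t : String) : List String :=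
  (PySem.Chars.splitOn t.toList ['/']).map String.ofList

def expand_slash_alternatives (tokens : List String) : List (List String) :=
  -- max_alternatives scan
  let maxAlt := tokens.foldl (fun acc token =>
    if token = "" then acc
    else max acc (PySem.Str.count token "/" + 1)) 1
  let maxAlt4 := min maxAlt 4
  -- result loop: for alt_idx in range(max_alternatives): build new_line token by token
  (List.range maxAlt4).foldl (fun result alt_idx =>
    result ++ [tokens.foldl (fun new_line token =>
      if token = "" then new_line ++ [""]
      else
        let alternatives := pySplitSlash token
        if alt_idx < alternatives.length then new_line ++ [alternatives.getD alt_idx ""]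
        else new_line ++ [""]) []]) []

-- ===== PORT B =====
-- termination measure for the transpose loop
theorem pvColsSumLe (ls : List (List String)) :
    ((ls.map List.tail).map List.length).sum ≤ (ls.map List.length).sum := by
  induction ls with
  | nil => simp
  | cons x xs ih =>
    have : x.tail.length ≤ x.length := by cases x <;> simp
    simp only [List.map_cons, List.sum_cons]
    omega

theorem pvColsSumLt (ls : List (List String)) (h : ¬ ls.all List.isEmpty = true) :
    ((ls.map List.tail).map List.length).sum < (ls.map List.length).sum := by
  induction ls with
  | nil => simp at h
  | cons x xs ih =>
    simp only [List.all_cons, Bool.and_eq_true] at h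
    by_cases hx : x.isEmpty = true
    · have hxs : ¬ xs.all List.isEmpty = true := by tauto
      have := ih hxs
      have hle : x.tail.length ≤ x.length := by cases x <;> simp
      simp only [List.map_cons, List.sum_cons]
      omega
    · have hx' : x ≠ [] := by simpa [List.isEmpty_iff] using hx
      have h1 : x.tail.length < x.length := by cases x with
        | nil => exact absurd rfl hx'
        | cons a t => simp
      have h2 := pvColsSumLe xs
      simp only [List.map_cons, List.sum_cons]
      omega

-- the while-loop: while any(cols): rows.append(heads); cols = tails
def pvRows (cols : List (List String)) : List (List String) :=
  if _h : cols.all List.isEmpty = true then []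
  else (cols.map (fun c => c.headD "")) :: pvRows (cols.map List.tail)
termination_by (cols.map List.length).sum
decreasing_by simpa using pvColsSumLt cols _h

def expand_slash_alternatives_alt (tokens : List String) : List (List String) :=
  if tokens = [] then [[]]
  else (pvRows (tokens.map (fun token => pySplitSlash token))).take 4

-- ===== PRECONDITION & SPEC =====
def Spec_expand_slash_alternatives (tokens : List String) (out : List (List String)) : Prop := out = expand_slash_alternatives_alt tokens
instance (tokens : List String) (out : List (List String)) : Decidable (Spec_expand_slash_alternatives tokens out) := by unfold Spec_expand_slash_alternatives; infer_instance

-- ===== CLAIM (what is proved, stated in full; the proofs are below) =====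
def Claim_equal_expand_slash_alternatives : Prop := ∀ (tokens : List String), Dom_expand_slash_alternatives tokens → Spec_expand_slash_alternatives tokens (expand_slash_alternatives tokens)

-- ===== LEMMAS AND PROOFS =====

-- count.go with enough fuel counts the '/' characters
theorem pvCountGo (fuel : Nat) : ∀ (cs : List Char) (acc : Nat), cs.length ≤ fuel →
    PySem.Chars.count.go ['/'] fuel cs acc = acc + cs.count '/' := by
  induction fuel with
  | zero =>
    intro cs acc h
    have : cs = [] := List.eq_nil_of_length_eq_zero (Nat.le_zero.mp h)
    subst this; simp [PySem.Chars.count.go]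
  | succ n ih =>
    intro cs acc h
    cases cs with
    | nil => simp [PySem.Chars.count.go]
    | cons c rest =>
      rw [PySem.Chars.count.go]
      by_cases hc : c = '/'
      · subst hc
        simp only [List.isPrefixOf, BEq.rfl, Bool.true_and, if_true,
          List.drop_one, List.tail_cons, List.length_singleton]
        rw [ih rest (acc + 1) (by simpa using h)]
        simp
        omega
      · have : (['/'].isPrefixOf (c :: rest)) = false := by
          simp [List.isPrefixOf]
          intro h'; exact absurd h'.symm hc
        rw [this]
        simp only [if_false, Bool.false_eq_true]
        rw [ih rest acc (by simpa using h)]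
        simp [hc]

-- length of splitOn.go with enough fuel
theorem pvSplitGoLen (fuel : Nat) : ∀ (cs : List Char) (cur : List Char) (acc : List (List Char)),
    cs.length ≤ fuel →
    (PySem.Chars.splitOn.go ['/'] fuel cs cur acc).length = acc.length + 1 + cs.count '/' := by
  induction fuel with
  | zero =>
    intro cs cur acc h
    have : cs = [] := List.eq_nil_of_length_eq_zero (Nat.le_zero.mp h)
    subst this; simp [PySem.Chars.splitOn.go]
  | succ n ih =>
    intro cs cur acc h
    cases cs with
    | nil => simp [PySem.Chars.splitOn.go]
    | cons c rest =>
      rw [PySem.Chars.splitOn.go]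
      by_cases hc : c = '/'
      · subst hc
        simp only [List.isPrefixOf, BEq.rfl, Bool.true_and, if_true,
          List.drop_one, List.tail_cons, List.length_singleton]
        rw [ih rest [] (cur.reverse :: acc) (by simpa using h)]
        simp
        omega
      · have : (['/'].isPrefixOf (c :: rest)) = false := by
          simp [List.isPrefixOf]
          intro h'; exact absurd h'.symm hc
        rw [this]
        simp only [if_false, Bool.false_eq_true]
        rw [ih rest (c :: cur) acc (by simpa using h)]
        simp [hc]

-- each token splits into count('/')+1 alternatives
theorem pvLenSplit (t : String) : (pySplitSlash t).length = PySem.Str.count t "/" + 1 := by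
  unfold pySplitSlash
  rw [PySem.Chars.splitOn, PySem.Str.count_eq, PySem.Chars.count]
  simp only [List.length_map]
  rw [pvSplitGoLen (t.toList.length + 1) t.toList [] [] (by omega)]
  have hsep : ("/".toList : List Char) = ['/'] := rfl
  rw [hsep]
  simp only [List.isEmpty_cons, if_false, Bool.false_eq_true]
  rw [pvCountGo t.toList.length t.toList 0 (le_refl _)]
  simp only [List.length_nil]
  omega

theorem pvSplitNeNil (t : String) : pySplitSlash t ≠ [] := by
  intro h
  have := pvLenSplit t
  rw [h] at this
  simp at this

-- max column length
def pvMaxLen (ls : List (List String)) : Nat := ls.foldr (fun l m => max l.length m) 0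

theorem pvMaxLen_tail (ls : List (List String)) :
    pvMaxLen (ls.map List.tail) = pvMaxLen ls - 1 := by
  induction ls with
  | nil => simp [pvMaxLen]
  | cons x xs ih =>
    simp only [pvMaxLen, List.map_cons, List.foldr_cons] at *
    have hx : x.tail.length = x.length - 1 := by cases x <;> simp
    omega

theorem pvAllEmpty_iff (ls : List (List String)) :
    ls.all List.isEmpty = true ↔ pvMaxLen ls = 0 := by
  induction ls with
  | nil => simp [pvMaxLen]
  | cons x xs ih =>
    simp only [List.all_cons, Bool.and_eq_true, ih, pvMaxLen, List.foldr_cons,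
      Nat.max_eq_zero_iff, List.isEmpty_iff, List.length_eq_zero_iff]

theorem pvGetD_tail {α : Type} (l : List α) (i : Nat) (d : α) :
    l.tail.getD i d = l.getD (i + 1) d := by
  cases l <;> simp [List.getD]

-- the transpose loop produces exactly the rows indexed by range (pvMaxLen ls)
theorem pvRowsEq (n : Nat) : ∀ (ls : List (List String)), pvMaxLen ls = n →
    pvRows ls = (List.range n).map (fun i => ls.map (fun l => l.getD i "")) := by
  induction n with
  | zero =>
    intro ls h
    rw [pvRows]
    simp [(pvAllEmpty_iff ls).mpr h]
  | succ n ih =>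
    intro ls h
    rw [pvRows]
    have hne : ¬ ls.all List.isEmpty = true := by
      rw [pvAllEmpty_iff]; omega
    rw [dif_neg hne]
    rw [ih (ls.map List.tail) (by rw [pvMaxLen_tail, h]; omega)]
    rw [List.range_succ_eq_map]
    simp only [List.map_cons, List.map_map]
    congr 1
    · apply List.map_congr_left
      intro l _
      cases l <;> simp [List.getD]
    · apply List.map_congr_left
      intro i _
      simp only [Function.comp_apply]
      apply List.map_congr_left
      intro l _
      simp only [Function.comp_apply]
      exact pvGetD_tail l i ""

-- split of the empty token
theorem pvSplitEmpty : pySplitSlash "" = [""] := by decide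

theorem pvGetD_single (i : Nat) : ([""] : List String).getD i "" = "" := by
  cases i <;> simp [List.getD]

-- A's max_alternatives scan computes max acc (pvMaxLen splits)
theorem pvFoldMax : ∀ (tokens : List String) (acc : Nat), 1 ≤ acc →
    tokens.foldl (fun acc token =>
      if token = "" then acc
      else max acc (PySem.Str.count token "/" + 1)) acc
    = max acc (pvMaxLen (tokens.map pySplitSlash)) := by
  intro tokens
  induction tokens with
  | nil => intro acc h; simp [pvMaxLen]
  | cons t ts ih =>
    intro acc h
    simp only [List.foldl_cons, List.map_cons, pvMaxLen, List.foldr_cons]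
    by_cases ht : t = ""
    · subst ht
      rw [if_pos rfl, ih acc h]
      have h1 : (pySplitSlash "").length = 1 := by simp [pvSplitEmpty]
      rw [h1]
      have h2 : pvMaxLen (ts.map pySplitSlash) = (ts.map pySplitSlash).foldr (fun l m => max l.length m) 0 := rfl
      omega
    · rw [if_neg ht, ih (max acc (PySem.Str.count t "/" + 1)) (by omega)]
      rw [← pvLenSplit t]
      have : pvMaxLen (ts.map pySplitSlash) = (ts.map pySplitSlash).foldr (fun l m => max l.length m) 0 := rfl
      omega

-- A's row alt_idx equals B's getD-based row
theorem pvRowEq (tokens : List String) (i : Nat) :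
    tokens.foldl (fun new_line token =>
      if token = "" then new_line ++ [""]
      else
        let alternatives := pySplitSlash token
        if i < alternatives.length then new_line ++ [alternatives.getD i ""]
        else new_line ++ [""]) []
    = tokens.map (fun token => (pySplitSlash token).getD i "") := by
  induction tokens using List.reverseRecOn with
  | nil => rfl
  | append_singleton ts t ih =>
    rw [List.foldl_append, List.map_append, ih]
    simp only [List.foldl_cons, List.foldl_nil, List.map_cons, List.map_nil]
    by_cases ht : t = ""
    · subst ht
      rw [if_pos rfl, pvSplitEmpty, pvGetD_single]
    · rw [if_neg ht]
      by_cases hi : i < (pySplitSlash t).length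
      · simp [hi]
      · simp only [hi, if_false]
        rw [List.getD_eq_default]
        omega

-- ===== VERDICT (by name: the statement is the Claim_ definition above) =====
theorem expand_slash_alternatives_spec : Claim_equal_expand_slash_alternatives := by
  intro tokens _
  unfold Spec_expand_slash_alternatives expand_slash_alternatives expand_slash_alternatives_alt
  by_cases h0 : tokens = []
  · subst h0; decide
  · rw [if_neg h0]
    dsimp only
    set L := pvMaxLen (tokens.map pySplitSlash) with hL
    have hL1 : 1 ≤ L := by
      cases tokens with
      | nil => exact absurd rfl h0
      | cons t ts =>
        have := pvSplitNeNil t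
        have hlen : 1 ≤ (pySplitSlash t).length := by
          cases hss : pySplitSlash t with
          | nil => exact absurd hss this
          | cons a l => simp
        simp only [hL, List.map_cons, pvMaxLen, List.foldr_cons]
        omega
    rw [pvRowsEq L (tokens.map pySplitSlash) rfl]
    rw [pvFoldMax tokens 1 (le_refl 1)]
    have hm : min (max 1 L) 4 = min 4 L := by omega
    rw [hm, ← List.map_take, List.take_range]
    rw [PySem.List.foldl_append_singleton_eq_map]
    apply List.map_congr_left
    intro i _
    simpa [List.map_map, Function.comp] using pvRowEq tokens i
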